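-- pv_equiv track=rewrite | github.com/rsleiberin/open-darf | constitution_scope/scope.py | _match_scope
-- ===== SOURCE A (Python) =====
-- def _match_scope(principal_scope: str, required: str) -> bool:
--     """Segment-wise wildcard match, using ':' as a separator."""
--     ps = principal_scope.split(":")
--     rs = required.split(":")
--     # allow ps to be shorter; '*' matches any remainder
--     for i, seg in enumerate(ps):
--         if seg == "*":
--             return True
--         if i >= len(rs) or seg != rs[i]:
--             return False
--     return len(ps) == len(rs)
-- ===== SOURCE B (Python) =====
-- def _match_scope(principal_scope: str, required: str) -> bool:
--     """Segment-wise wildcard match via first-'*' position and prefix-slice equality."""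
--     ps = principal_scope.split(":")
--     rs = required.split(":")
--     if "*" in ps:
--         i = ps.index("*")
--         return ps[:i] == rs[:i]
--     return ps == rs
-- ===== Notes on version B (the rewrite author's own statement) =====
-- stated objective: simpler
-- what changed: Replaces the index-driven per-segment loop with early exits by locating the first '*' segment and comparing the prefix slices before it (or whole-list equality when there is no '*').
import Mathlib
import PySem

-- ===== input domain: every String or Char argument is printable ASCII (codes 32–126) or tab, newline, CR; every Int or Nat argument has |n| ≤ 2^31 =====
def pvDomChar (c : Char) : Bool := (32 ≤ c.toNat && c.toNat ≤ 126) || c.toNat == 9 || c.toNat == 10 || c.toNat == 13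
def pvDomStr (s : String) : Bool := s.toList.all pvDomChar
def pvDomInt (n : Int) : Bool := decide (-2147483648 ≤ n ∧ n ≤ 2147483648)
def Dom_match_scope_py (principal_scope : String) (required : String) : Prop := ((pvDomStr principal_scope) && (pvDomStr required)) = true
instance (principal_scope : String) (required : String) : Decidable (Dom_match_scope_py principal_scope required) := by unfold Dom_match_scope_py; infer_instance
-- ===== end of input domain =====

-- B replaces A's index-driven per-segment loop with a first-'*' lookup plus prefix-slice comparison (objective: simpler).

-- s.split(":") — sep is nonempty, so PySem.Str.split? always returns some; exact
def pySplitColon (s : String) : List String :=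
  (PySem.Str.split? s ":").getD []

-- ===== PORT A =====
-- the 'for i, seg in enumerate(ps)' loop with its two early returns; 'fin' is the
-- final 'len(ps) == len(rs)' value; rs is indexed by i exactly as in the Python
def matchScopeLoop (rs : List String) (fin : Bool) : List String → Nat → Bool
  | [], _ => fin
  | seg :: rest, i =>
    if seg = "*" then true
    else if i ≥ rs.length ∨ seg ≠ rs.getD i "" then false
    else matchScopeLoop rs fin rest (i + 1)

def match_scope_py (principal_scope : String) (required : String) : Bool :=
  let ps := pySplitColon principal_scope
  let rs := pySplitColon required
  matchScopeLoop rs (decide (ps.length = rs.length)) ps 0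

-- ===== PORT B =====
def match_scope_py_alt (principal_scope : String) (required : String) : Bool :=
  let ps := pySplitColon principal_scope
  let rs := pySplitColon required
  match PySem.List.index? ps "*" with
  | some i => decide (ps.take i = rs.take i)
  | none => decide (ps = rs)

-- ===== PRECONDITION & SPEC =====
def Spec_match_scope_py (principal_scope : String) (required : String) (out : Bool) : Prop := out = match_scope_py_alt principal_scope required
instance (principal_scope : String) (required : String) (out : Bool) : Decidable (Spec_match_scope_py principal_scope required out) := by unfold Spec_match_scope_py; infer_instance

-- ===== CLAIM (what is proved, stated in full; the proofs are below) =====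
def Claim_equal_match_scope_py : Prop := ∀ (principal_scope : String) (required : String), Dom_match_scope_py principal_scope required → Spec_match_scope_py principal_scope required (match_scope_py principal_scope required)

-- ===== LEMMAS AND PROOFS =====

-- A's loop consulted from index i only sees rs.drop i
theorem matchScopeLoop_drop (rs : List String) (fin : Bool) (ps : List String) (i : Nat) :
    matchScopeLoop rs fin ps i =
      (match ps, rs.drop i with
       | [], _ => fin
       | seg :: _, [] => if seg = "*" then true else false
       | seg :: rest, r :: _ =>
         if seg = "*" then true
         else if seg ≠ r then false
         else matchScopeLoop rs fin rest (i + 1)) := by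
  match ps with
  | [] => simp [matchScopeLoop]
  | seg :: rest =>
    simp only [matchScopeLoop]
    rcases h : rs.drop i with _ | ⟨r, t⟩
    · have hlen : rs.length ≤ i := by
        have := List.drop_eq_nil_iff.mp h; omega
      simp [hlen]
    · have hi : i < rs.length := by
        by_contra hc
        rw [List.drop_eq_nil_iff.mpr (by omega)] at h; cases h
      have h0 : rs[i]? = some r := by
        have h1 : (rs.drop i)[0]? = some r := by rw [h]; rfl
        rw [List.getElem?_drop] at h1
        simpa using h1
      simp [show ¬ rs.length ≤ i from by omega, List.getD_eq_getElem?_getD, h0]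

-- core: the loop on (ps, remaining rs) equals B's first-'*' / prefix formulation
theorem loop_eq_alt (ps : List String) (rs' : List String) (rs : List String) (i : Nat)
    (hdrop : rs.drop i = rs') (fin : Bool) (hfin : fin = decide (ps.length = rs'.length)) :
    matchScopeLoop rs fin ps i =
      (match PySem.List.index? ps "*" with
       | some k => decide (ps.take k = rs'.take k)
       | none => decide (ps = rs')) := by
  induction ps generalizing rs' i fin with
  | nil =>
    rw [matchScopeLoop_drop, hdrop]
    subst hfin
    cases rs' <;> simp [PySem.List.index?]
  | cons seg rest ih =>
    rw [matchScopeLoop_drop, hdrop]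
    by_cases hstar : seg = "*"
    · subst hstar
      rw [PySem.List.index?_cons_self]
      cases rs' <;> simp
    · rw [PySem.List.index?_cons_of_ne rest hstar]
      rcases rs' with _ | ⟨r, rtl⟩
      · rcases hidx : PySem.List.index? rest "*" with _ | k <;> simp [hstar]
      · by_cases hr : seg = r
        · subst hr
          have hdrop' : rs.drop (i + 1) = rtl := by
            have h1 : rs.drop (i + 1) = (rs.drop i).drop 1 := by
              rw [List.drop_drop]
            rw [h1, hdrop]; simp
          have hfin' : fin = decide (rest.length = rtl.length) := by
            rw [hfin]; simp only [List.length_cons]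
            exact decide_eq_decide.mpr ⟨fun h => by omega, fun h => by omega⟩
          have hih := ih rtl (i + 1) hdrop' fin hfin'
          rcases hidx : PySem.List.index? rest "*" with _ | k <;>
            rw [hidx] at hih <;> simp at hih <;> simp [hstar, hih, List.take_succ_cons]
        · rcases hidx : PySem.List.index? rest "*" with _ | k <;> simp [hstar, hr]

-- ===== VERDICT (by name: the statement is the Claim_ definition above) =====
theorem match_scope_py_spec : Claim_equal_match_scope_py := by
  intro p r _
  unfold Spec_match_scope_py match_scope_py match_scope_py_alt
  exact loop_eq_alt _ _ _ 0 (by simp) _ rfl
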